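-- pv_equiv track=rewrite | github.com/AmpliconSuite/CycleExtractor | CE.py | is_edge_type_alternating
-- ===== SOURCE A (Python) =====
-- def is_edge_type_alternating(walk):
--
--     # Check that edge labels alternate between:
--     # 'sequence edge' and ('discordant edge' or 'concordant edge')
--     # Nodes are ignored.
--
--     edge_sequence = [label for (label, _) in walk if "edge" in label]
--     if not edge_sequence:
--         return True  # Nothing to validate
--
--     expected = "sequence edge" if edge_sequence[0] == "sequence edge" else "non-sequence"
--
--     for label in edge_sequence:
--         if expected == "sequence edge":
--             if label != "sequence edge":
--                 return False
--             expected = "non-sequence"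
--         else:
--             if label not in {"discordant edge", "concordant edge"}:
--                 return False
--             expected = "sequence edge"
--
--     return True
-- ===== SOURCE B (Python) =====
-- def is_edge_type_alternating(walk):
--     # Flag-list decomposition: compute boolean flags once, then check
--     # (1) strict alternation of adjacent flags, (2) every non-sequence label is valid.
--     labels = [label for (label, _) in walk if "edge" in label]
--     flags = [label == "sequence edge" for label in labels]
--     if any(f1 == f2 for f1, f2 in zip(flags, flags[1:])):
--         return False
--     return all(f or label in ("discordant edge", "concordant edge")
--                for label, f in zip(labels, flags))
-- ===== Notes on version B (the rewrite author's own statement) =====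
-- stated objective: simpler
-- what changed: Replaces A's stateful expected-label loop with a stateless decomposition: a boolean flag list, a pairwise adjacent-alternation check over zipped neighbours, and a separate membership check of the non-sequence labels.
import Mathlib
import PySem

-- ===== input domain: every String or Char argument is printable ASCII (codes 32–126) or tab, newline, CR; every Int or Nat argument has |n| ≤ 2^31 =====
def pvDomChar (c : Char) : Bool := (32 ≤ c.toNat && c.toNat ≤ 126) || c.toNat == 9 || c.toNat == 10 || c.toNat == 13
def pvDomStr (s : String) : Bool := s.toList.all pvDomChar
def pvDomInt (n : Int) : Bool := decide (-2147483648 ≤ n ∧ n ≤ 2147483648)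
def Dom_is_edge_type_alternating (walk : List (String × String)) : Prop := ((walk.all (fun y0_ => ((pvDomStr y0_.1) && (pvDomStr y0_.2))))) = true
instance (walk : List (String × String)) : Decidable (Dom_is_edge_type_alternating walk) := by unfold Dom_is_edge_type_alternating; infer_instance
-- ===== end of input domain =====

-- B replaces A's stateful expected-label loop by a stateless decomposition (flag list +
-- adjacent-alternation check + separate membership check); objective: simpler.


-- ===== PORT A =====
-- A's for-loop over edge_sequence carrying the mutable string `expected`
def pvALoop : String → List String → Bool
  | _, [] => true
  | expected, label :: rest =>
    if expected == "sequence edge" then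
      if label != "sequence edge" then false
      else pvALoop "non-sequence" rest
    else
      if !(label == "discordant edge" || label == "concordant edge") then false
      else pvALoop "sequence edge" rest

def is_edge_type_alternating (walk : List (String × String)) : Bool :=
  let edge_sequence := (walk.filter (fun p => PySem.Str.isIn "edge" p.1)).map Prod.fst
  match edge_sequence with
  | [] => true    -- nothing to validate
  | first :: _ =>
    let expected := if first == "sequence edge" then "sequence edge" else "non-sequence"
    pvALoop expected edge_sequence

-- ===== PORT B =====
def is_edge_type_alternating_alt (walk : List (String × String)) : Bool :=
  let labels := (walk.filter (fun p => PySem.Str.isIn "edge" p.1)).map Prod.fst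
  let flags := labels.map (fun label => label == "sequence edge")
  if (flags.zip flags.tail).any (fun fp => fp.1 == fp.2) then false
  else (labels.zip flags).all (fun lf =>
    lf.2 || (lf.1 == "discordant edge" || lf.1 == "concordant edge"))

-- ===== PRECONDITION & SPEC =====
def Spec_is_edge_type_alternating (walk : List (String × String)) (out : Bool) : Prop := out = is_edge_type_alternating_alt walk
instance (walk : List (String × String)) (out : Bool) : Decidable (Spec_is_edge_type_alternating walk out) := by unfold Spec_is_edge_type_alternating; infer_instance

-- ===== CLAIM (what is proved, stated in full; the proofs are below) =====
def Claim_equal_is_edge_type_alternating : Prop := ∀ (walk : List (String × String)), Dom_is_edge_type_alternating walk → Spec_is_edge_type_alternating walk (is_edge_type_alternating walk)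

-- ===== LEMMAS AND PROOFS =====

-- B's whole check on a bare label list (the shared filtered list factored out)
def pvB (ls : List String) : Bool :=
  let flags := ls.map (fun label => label == "sequence edge")
  if (flags.zip flags.tail).any (fun fp => fp.1 == fp.2) then false
  else (ls.zip flags).all (fun lf =>
    lf.2 || (lf.1 == "discordant edge" || lf.1 == "concordant edge"))

lemma pvB_nil : pvB [] = true := by simp [pvB]

lemma pvB_single (l : String) :
    pvB [l] = (l == "sequence edge" || (l == "discordant edge" || l == "concordant edge")) := by
  simp [pvB]

lemma pvB_cons₂ (l l2 : String) (r : List String) :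
    pvB (l :: l2 :: r) =
      (!((l == "sequence edge") == (l2 == "sequence edge")) &&
        ((l == "sequence edge" || (l == "discordant edge" || l == "concordant edge")) &&
          pvB (l2 :: r))) := by
  simp only [pvB, List.map_cons, List.tail_cons, List.zip_cons_cons, List.any_cons,
    List.all_cons]
  cases h : ((l == "sequence edge") == (l2 == "sequence edge")) <;>
    cases h2 : ((((l2 == "sequence edge") :: List.map (fun label => label == "sequence edge") r).zip
        (List.map (fun label => label == "sequence edge") r)).any fun fp => fp.1 == fp.2) <;>
    simp [h2]

lemma pvALoop_eq (ls : List String) (e : Bool) :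
    pvALoop (if e then "sequence edge" else "non-sequence") ls =
      ((match ls with
        | [] => true
        | l :: _ => ((l == "sequence edge") == e)) && pvB ls) := by
  induction ls generalizing e with
  | nil => cases e <;> simp [pvALoop, pvB_nil]
  | cons l rest ih =>
    cases e with
    | true =>
      by_cases hl : l = "sequence edge"
      · subst hl
        have h1 := ih false
        simp only [Bool.false_eq_true, if_false] at h1
        simp only [if_pos, pvALoop, beq_self_eq_true, bne_self_eq_false, Bool.false_eq_true,
          if_false, if_true, h1]
        cases rest with
        | nil => simp [pvB_nil, pvB_single]
        | cons l2 r2 =>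
          rw [pvB_cons₂]
          cases hf2 : (l2 == "sequence edge") <;> simp [hf2]
      · have hf : (l == "sequence edge") = false := by simp [hl]
        simp [pvALoop, hl, hf]
    | false =>
      by_cases hl : l = "sequence edge"
      · subst hl
        simp [pvALoop]
      · have hf : (l == "sequence edge") = false := by simp [hl]
        by_cases hm : (l == "discordant edge" || l == "concordant edge") = true
        · have h0 := ih true
          simp only [if_true] at h0
          simp only [if_neg, pvALoop, hf, Bool.false_eq_true, if_false, hm, Bool.not_true,
            if_true, h0, beq_self_eq_true, Bool.true_and]
          cases rest with
          | nil => simp [pvALoop, pvB_nil, pvB_single, hm]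
          | cons l2 r2 =>
            rw [pvB_cons₂, hf]
            cases hf2 : (l2 == "sequence edge") <;> simp [hf2, hm]
        · simp only [Bool.or_eq_true, not_or] at hm
          have hd : (l == "discordant edge") = false := Bool.eq_false_iff.mpr hm.1
          have hc : (l == "concordant edge") = false := Bool.eq_false_iff.mpr hm.2
          simp only [if_neg, pvALoop, hf, Bool.false_eq_true, if_false, hd, hc, Bool.or_false,
            Bool.not_false, if_true, beq_self_eq_true, Bool.true_and]
          cases rest with
          | nil => simp [pvB_single, hf, hd, hc]
          | cons l2 r2 => rw [pvB_cons₂, hf, hd, hc]; simp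

-- ===== VERDICT (by name: the statement is the Claim_ definition above) =====
theorem is_edge_type_alternating_spec : Claim_equal_is_edge_type_alternating := by
  intro walk _
  unfold Spec_is_edge_type_alternating is_edge_type_alternating is_edge_type_alternating_alt
  show _ = pvB ((walk.filter (fun p => PySem.Str.isIn "edge" p.1)).map Prod.fst)
  cases h : (walk.filter (fun p => PySem.Str.isIn "edge" p.1)).map Prod.fst with
  | nil => simp [pvB_nil]
  | cons a l =>
    show pvALoop (if ((a == "sequence edge") = true) then "sequence edge" else "non-sequence")
        (a :: l) = pvB (a :: l)
    by_cases ha : (a == "sequence edge") = true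
    · rw [if_pos ha]
      have h2 := pvALoop_eq (a :: l) true
      simp only [if_true] at h2
      rw [h2]; simp [ha]
    · rw [if_neg ha]
      have h2 := pvALoop_eq (a :: l) false
      simp only [Bool.false_eq_true, if_false] at h2
      rw [h2]
      simp only [Bool.not_eq_true] at ha
      simp [ha]
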